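-- pv_equiv track=rewrite | github.com/shinyeonjun/DE-pipeline | web/backend/app/features/chat/steps/step5_response_generation.py | strip_markdown_tables
-- ===== SOURCE A (Python) =====
-- def strip_markdown_tables(text: str) -> str:
--     """텍스트에서 마크다운 테이블을 제거합니다."""
--     lines = text.splitlines()
--     cleaned = []
--     i = 0
--     while i < len(lines):
--         line = lines[i].strip()
--         # 테이블 헤더 및 구분선 감지
--         if line.startswith("|") and i + 1 < len(lines):
--             next_line = lines[i + 1].strip()
--             if next_line.startswith("|") and set(next_line) <= set("|:- "):
--                 i += 2
--                 while i < len(lines) and lines[i].strip().startswith("|"):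
--                     i += 1
--                 continue
--         cleaned.append(lines[i])
--         i += 1
--     return "\n".join(cleaned).strip()
-- ===== SOURCE B (Python) =====
-- def strip_markdown_tables(text: str) -> str:
--     """Two-stage approach: segment the lines into maximal runs of equal pipe-ness,
--     then for each pipe run keep only the prefix before the first header whose
--     following line is a separator (non-pipe runs are kept whole)."""
--     lines = text.splitlines()
--     n = len(lines)
--     kept = []
--     start = 0
--     while start < n:
--         p = lines[start].strip().startswith("|")
--         end = start + 1
--         while end < n and lines[end].strip().startswith("|") == p:
--             end += 1
--         run = lines[start:end]
--         if p:
--             cut = len(run)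
--             for k in range(len(run) - 1):
--                 if set(run[k + 1].strip()) <= set("|:- "):
--                     cut = k
--                     break
--             kept.extend(run[:cut])
--         else:
--             kept.extend(run)
--         start = end
--     return "\n".join(kept).strip()
-- ===== Notes on version B (the rewrite author's own statement) =====
-- stated objective: alternative
-- what changed: Replaces A's single scan with index jumps and a nested skip loop by a two-stage run-segmentation: split the lines into maximal runs of equal pipe-ness, then keep each non-pipe run whole and truncate each pipe run at the first line whose successor is a separator line (made only of pipes, colons, dashes and spaces).
import Mathlib
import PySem

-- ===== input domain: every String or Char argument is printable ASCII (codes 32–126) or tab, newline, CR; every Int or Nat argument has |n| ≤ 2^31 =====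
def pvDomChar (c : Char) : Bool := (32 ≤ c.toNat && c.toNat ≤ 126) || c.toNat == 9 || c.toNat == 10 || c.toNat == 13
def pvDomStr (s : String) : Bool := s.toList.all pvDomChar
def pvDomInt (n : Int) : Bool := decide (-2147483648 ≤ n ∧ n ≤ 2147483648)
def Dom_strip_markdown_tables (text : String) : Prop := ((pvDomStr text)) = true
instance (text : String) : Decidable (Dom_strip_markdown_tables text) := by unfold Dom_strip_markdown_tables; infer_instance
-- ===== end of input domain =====

-- B replaces A's index-jumping scan (with an inner skip-while loop) by a two-stage
-- run-segmentation: split the lines into maximal runs of equal pipe-ness, keep non-pipe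
-- runs whole, and truncate each pipe run at the first line followed by a separator line.

-- ===== PORT A =====
-- inner 'while i < len(lines) and lines[i].strip().startswith("|"): i += 1'
def stripA_skip (lines : List String) (i : Nat) : Nat :=
  if h : i < lines.length then
    if PySem.Str.startswith (PySem.Str.strip lines[i]) "|" then
      stripA_skip lines (i + 1)
    else i
  else i
termination_by lines.length - i

theorem stripA_skip_ge (lines : List String) (i : Nat) : i ≤ stripA_skip lines i := by
  fun_induction stripA_skip lines i with
  | case1 j h hs ih => omega
  | case2 => omega
  | case3 => omega

-- the outer 'while i < len(lines)' loop with accumulator 'cleaned'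
def stripA_go (lines : List String) (i : Nat) (cleaned : List String) : List String :=
  if h : i < lines.length then
    if h2 : PySem.Str.startswith (PySem.Str.strip lines[i]) "|" = true ∧ i + 1 < lines.length then
      let next_line := PySem.Str.strip (lines[i + 1]'h2.2)
      if PySem.Str.startswith next_line "|" &&
         PySem.Set.issubset (PySem.Set.ofList next_line.toList) (PySem.Set.ofList "|:- ".toList) then
        stripA_go lines (stripA_skip lines (i + 2)) cleaned
      else
        stripA_go lines (i + 1) (cleaned ++ [lines[i]])
    else
      stripA_go lines (i + 1) (cleaned ++ [lines[i]])
  else cleaned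
termination_by lines.length - i
decreasing_by
  · have := stripA_skip_ge lines (i + 2); omega
  · omega
  · omega

def strip_markdown_tables (text : String) : String :=
  let lines := PySem.Str.splitlines text
  PySem.Str.strip (PySem.Str.join "\n" (stripA_go lines 0 []))

-- ===== PORT B =====
-- lines[start].strip().startswith("|")
def stripB_pipe (ln : String) : Bool := PySem.Str.startswith (PySem.Str.strip ln) "|"

-- set(ln.strip()) <= set("|:- ")
def stripB_sep (ln : String) : Bool :=
  PySem.Set.issubset (PySem.Set.ofList (PySem.Str.strip ln).toList) (PySem.Set.ofList "|:- ".toList)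

-- inner 'while end < n and lines[end].strip().startswith("|") == p: end += 1'
def stripB_runEnd (lines : List String) (p : Bool) (e : Nat) : Nat :=
  if h : e < lines.length then
    if stripB_pipe lines[e] == p then stripB_runEnd lines p (e + 1) else e
  else e
termination_by lines.length - e

theorem stripB_runEnd_ge (lines : List String) (p : Bool) (e : Nat) :
    e ≤ stripB_runEnd lines p e := by
  fun_induction stripB_runEnd lines p e with
  | case1 j h hs ih => omega
  | case2 => omega
  | case3 => omega

-- 'cut = len(run); for k in range(len(run) - 1): if set(run[k+1].strip()) <= set("|:- "): cut = k; break'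
def stripB_cut (run : List String) (k : Nat) : Nat :=
  if h : k + 1 < run.length then
    if stripB_sep run[k + 1] then k else stripB_cut run (k + 1)
  else run.length
termination_by run.length - k

-- the outer 'while start < n' loop over maximal runs, accumulator 'kept'
def stripB_go (lines : List String) (start : Nat) (kept : List String) : List String :=
  if h : start < lines.length then
    let p := stripB_pipe lines[start]
    let e := stripB_runEnd lines p (start + 1)
    let run := PySem.List.slice lines (some (start : Int)) (some (e : Int))
    stripB_go lines e
      (if p then kept ++ PySem.List.slice run none (some ((stripB_cut run 0 : Nat) : Int))
       else kept ++ run)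
  else kept
termination_by lines.length - start
decreasing_by
  have := stripB_runEnd_ge lines (stripB_pipe lines[start]) (start + 1); omega

def strip_markdown_tables_alt (text : String) : String :=
  let lines := PySem.Str.splitlines text
  PySem.Str.strip (PySem.Str.join "\n" (stripB_go lines 0 []))

-- ===== PRECONDITION & SPEC =====
def Spec_strip_markdown_tables (text : String) (out : String) : Prop := out = strip_markdown_tables_alt text
instance (text : String) (out : String) : Decidable (Spec_strip_markdown_tables text out) := by unfold Spec_strip_markdown_tables; infer_instance

-- ===== CLAIM (what is proved, stated in full; the proofs are below) =====
def Claim_equal_strip_markdown_tables : Prop := ∀ (text : String), Dom_strip_markdown_tables text → Spec_strip_markdown_tables text (strip_markdown_tables text)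

-- ===== LEMMAS AND PROOFS =====

-- every line strictly inside the run has pipe-ness p
theorem stripB_runEnd_mem (lines : List String) (p : Bool) (e : Nat) :
    ∀ m, e ≤ m → m < stripB_runEnd lines p e → ∀ hm : m < lines.length, stripB_pipe lines[m] = p := by
  fun_induction stripB_runEnd lines p e with
  | case1 j h hs ih =>
      intro m h1 h2 hm
      rcases Nat.eq_or_lt_of_le h1 with rfl | hlt
      · simpa using hs
      · exact ih m hlt h2 hm
  | case2 j h hs => intro m h1 h2 hm; omega
  | case3 j h => intro m h1 h2 hm; omega

theorem stripB_runEnd_le (lines : List String) (p : Bool) (e : Nat) (he : e ≤ lines.length) :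
    stripB_runEnd lines p e ≤ lines.length := by
  fun_induction stripB_runEnd lines p e with
  | case1 j h hs ih => exact ih (by omega)
  | case2 j h hs => omega
  | case3 j h => omega

theorem stripB_runEnd_stop (lines : List String) (p : Bool) (e : Nat) :
    ∀ h : stripB_runEnd lines p e < lines.length,
      stripB_pipe (lines[stripB_runEnd lines p e]'h) ≠ p := by
  fun_induction stripB_runEnd lines p e with
  | case1 j h hs ih => exact ih
  | case2 j h hs => intro hlt; simpa using hs
  | case3 j h => intro hlt; omega

-- runEnd reached from any point inside the run is the same
theorem stripB_runEnd_determined (lines : List String) (E : Nat) (hE : E ≤ lines.length)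
    (hstop : ∀ h : E < lines.length, stripB_pipe (lines[E]'h) = false) :
    ∀ a, a ≤ E → (∀ m, a ≤ m → m < E → ∀ hm : m < lines.length, stripB_pipe lines[m] = true) →
    stripB_runEnd lines true a = E := by
  intro a
  induction hd : E - a generalizing a with
  | zero =>
      intro ha _
      have : a = E := by omega
      subst this
      rw [stripB_runEnd]
      split
      · rename_i h
        rw [hstop h]
        simp
      · rfl
  | succ d ih =>
      intro ha hrun
      have haE : a < E := by omega
      have haL : a < lines.length := by omega
      rw [stripB_runEnd]
      rw [dif_pos haL, if_pos (by simp [hrun a le_rfl haE haL])]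
      exact ih (a + 1) (by omega) (by omega) (fun m h1 h2 hm => hrun m (by omega) h2 hm)

-- A's inner skip loop is B's run-end computation for pipe lines
theorem stripA_skip_eq_runEnd (lines : List String) (j : Nat) :
    stripA_skip lines j = stripB_runEnd lines true j := by
  fun_induction stripA_skip lines j with
  | case1 i h hs ih =>
      rw [stripB_runEnd, dif_pos h, if_pos (by simpa [stripB_pipe] using hs)]
      exact ih
  | case2 i h hs =>
      rw [stripB_runEnd, dif_pos h, if_neg (by simpa [stripB_pipe] using hs)]
  | case3 i h =>
      rw [stripB_runEnd, dif_neg h]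

theorem stripB_cut_shift (x : String) (rest : List String) (k : Nat) :
    stripB_cut (x :: rest) (k + 1) = stripB_cut rest k + 1 := by
  fun_induction stripB_cut rest k with
  | case1 j h hs =>
      rw [stripB_cut, dif_pos (by simpa using Nat.succ_lt_succ h)]
      rw [if_pos (by simpa using hs)]
  | case2 j h hs ih =>
      rw [stripB_cut, dif_pos (by simpa using Nat.succ_lt_succ h)]
      rw [if_neg (by simpa using hs)]
      exact ih
  | case3 j h =>
      rw [stripB_cut, dif_neg (by simp only [List.length_cons]; omega)]
      simp

-- A over a maximal non-pipe run appends the run unchanged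
theorem A_nonpipe_run (lines : List String) (E : Nat) (hE : E ≤ lines.length) :
    ∀ j acc, j ≤ E → (∀ m, j ≤ m → m < E → ∀ hm : m < lines.length, stripB_pipe lines[m] = false) →
    stripA_go lines j acc = stripA_go lines E (acc ++ (lines.drop j).take (E - j)) := by
  intro j
  induction hd : E - j generalizing j with
  | zero =>
      intro acc hj _
      have : j = E := by omega
      subst this
      simp
  | succ d ih =>
      intro acc hj hrun
      have hjE : j < E := by omega
      have hjn : j < lines.length := by omega
      have hpipe : stripB_pipe lines[j] = false := hrun j le_rfl hjE hjn
      have hseg : (lines.drop j).take (E - j)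
          = lines[j] :: (lines.drop (j + 1)).take (E - (j + 1)) := by
        rw [List.drop_eq_getElem_cons hjn, show E - j = (E - (j + 1)) + 1 by omega,
          List.take_succ_cons]
      have hpipe' : PySem.Chars.startswith (PySem.Chars.strip lines[j].toList) ['|'] = false := by
        simpa [stripB_pipe] using hpipe
      have hfin : acc ++ [lines[j]] ++ (lines.drop (j + 1)).take d
          = acc ++ (lines.drop j).take (d + 1) := by
        rw [show d + 1 = E - j by omega, hseg, show E - (j + 1) = d by omega]
        simp
      rw [stripA_go, dif_pos hjn, dif_neg (by simp [hpipe'])]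
      rw [ih (j + 1) (by omega) (acc ++ [lines[j]]) (by omega)
        (fun m h1 h2 hm => hrun m (by omega) h2 hm), hfin]

-- A over a pipe run keeps exactly the prefix before B's cut point
theorem A_pipe_run (lines : List String) (E : Nat) (hE : E ≤ lines.length)
    (hstop : ∀ h : E < lines.length, stripB_pipe (lines[E]'h) = false) :
    ∀ j acc, j ≤ E → (∀ m, j ≤ m → m < E → ∀ hm : m < lines.length, stripB_pipe lines[m] = true) →
    stripA_go lines j acc
      = stripA_go lines E
          (acc ++ ((lines.drop j).take (E - j)).take (stripB_cut ((lines.drop j).take (E - j)) 0)) := by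
  intro j
  induction hd : E - j generalizing j with
  | zero =>
      intro acc hj _
      have : j = E := by omega
      subst this
      simp
  | succ d ih =>
      intro acc hj hrun
      rw [show d + 1 = E - j by omega]
      have hjE : j < E := by omega
      have hjn : j < lines.length := by omega
      have hpj : stripB_pipe lines[j] = true := hrun j le_rfl hjE hjn
      have hpj' : PySem.Str.startswith (PySem.Str.strip lines[j]) "|" = true := hpj
      rcases Nat.lt_or_ge (j + 1) E with hlt | hge
      · -- the run continues at j+1
        have hj1n : j + 1 < lines.length := by omega
        have hp1 : stripB_pipe lines[j + 1] = true := hrun (j + 1) (by omega) hlt hj1n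
        have hseg : (lines.drop j).take (E - j)
            = lines[j] :: (lines.drop (j + 1)).take (E - (j + 1)) := by
          rw [List.drop_eq_getElem_cons hjn, show E - j = (E - (j + 1)) + 1 by omega,
            List.take_succ_cons]
        have hlen1 : 1 < ((lines.drop j).take (E - j)).length := by
          simp only [List.length_take, List.length_drop]
          omega
        have hR1 : ((lines.drop j).take (E - j))[1]'hlen1 = lines[j + 1] := by
          simp [List.getElem_take, List.getElem_drop]
        rw [stripA_go, dif_pos hjn,
          dif_pos (show PySem.Str.startswith (PySem.Str.strip lines[j]) "|" = true
              ∧ j + 1 < lines.length from ⟨hpj', hj1n⟩)]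
        show (if stripB_pipe lines[j + 1] && stripB_sep lines[j + 1] then
                stripA_go lines (stripA_skip lines (j + 2)) acc
              else stripA_go lines (j + 1) (acc ++ [lines[j]]))
            = stripA_go lines E
                (acc ++ ((lines.drop j).take (E - j)).take
                  (stripB_cut ((lines.drop j).take (E - j)) 0))
        by_cases hsep : stripB_sep lines[j + 1]
        · -- header + separator: A skips to the run end, B's cut is 0
          rw [if_pos (by simp [hp1, hsep])]
          rw [stripA_skip_eq_runEnd,
            stripB_runEnd_determined lines E hE hstop (j + 2) (by omega)
              (fun m h1 h2 hm => hrun m (by omega) h2 hm)]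
          have hcut : stripB_cut ((lines.drop j).take (E - j)) 0 = 0 := by
            rw [stripB_cut, dif_pos hlen1, if_pos (by rw [hR1]; exact hsep)]
          rw [hcut]
          simp
        · -- no separator after j: A keeps line j, B's cut moves one to the right
          rw [if_neg (by simp [hp1, hsep])]
          have hcut : stripB_cut ((lines.drop j).take (E - j)) 0
              = stripB_cut ((lines.drop (j + 1)).take (E - (j + 1))) 0 + 1 := by
            have h1 : stripB_cut ((lines.drop j).take (E - j)) 0
                = stripB_cut ((lines.drop j).take (E - j)) 1 := by
              rw [stripB_cut, dif_pos hlen1, if_neg (by rw [hR1]; exact hsep)]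
            rw [h1, hseg]
            simpa using stripB_cut_shift lines[j] ((lines.drop (j + 1)).take (E - (j + 1))) 0
          have ih' := ih (j + 1) (by omega) (acc ++ [lines[j]]) (by omega)
            (fun m h1 h2 hm => hrun m (by omega) h2 hm)
          rw [show d = E - (j + 1) by omega] at ih'
          rw [ih', hcut, hseg, List.take_succ_cons]
          simp [List.append_assoc]
      · -- the run ends right after j
        have hEj : E = j + 1 := by omega
        subst hEj
        have hR : (lines.drop j).take (j + 1 - j) = [lines[j]] := by
          rw [show j + 1 - j = 1 by omega, List.drop_eq_getElem_cons hjn,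
            show (1 : Nat) = 0 + 1 by omega, List.take_succ_cons, List.take_zero]
          rfl
        have hcut : stripB_cut [lines[j]] 0 = 1 := by
          rw [stripB_cut]
          norm_num
        have hfin : stripA_go lines (j + 1) (acc ++ [lines[j]])
            = stripA_go lines (j + 1)
                (acc ++ ((lines.drop j).take (j + 1 - j)).take
                  (stripB_cut ((lines.drop j).take (j + 1 - j)) 0)) := by
          rw [hR, hcut]
          simp
        by_cases hn : j + 1 < lines.length
        · have hstopE : stripB_pipe lines[j + 1] = false := hstop hn
          rw [stripA_go, dif_pos hjn,
            dif_pos (show PySem.Str.startswith (PySem.Str.strip lines[j]) "|" = true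
                ∧ j + 1 < lines.length from ⟨hpj', hn⟩)]
          show (if stripB_pipe lines[j + 1] && stripB_sep lines[j + 1] then
                  stripA_go lines (stripA_skip lines (j + 2)) acc
                else stripA_go lines (j + 1) (acc ++ [lines[j]]))
              = stripA_go lines (j + 1)
                  (acc ++ ((lines.drop j).take (j + 1 - j)).take
                    (stripB_cut ((lines.drop j).take (j + 1 - j)) 0))
          rw [if_neg (by simp [hstopE]), hfin]
        · rw [stripA_go, dif_pos hjn, dif_neg (fun hc => hn hc.2)]
          exact hfin

theorem stripB_go_eq (lines : List String) (start : Nat) (kept : List String)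
    (h : start < lines.length) :
    stripB_go lines start kept
      = stripB_go lines (stripB_runEnd lines (stripB_pipe lines[start]) (start + 1))
          (if stripB_pipe lines[start] then
             kept ++ ((lines.drop start).take
                 (stripB_runEnd lines (stripB_pipe lines[start]) (start + 1) - start)).take
               (stripB_cut ((lines.drop start).take
                 (stripB_runEnd lines (stripB_pipe lines[start]) (start + 1) - start)) 0)
           else kept ++ (lines.drop start).take
               (stripB_runEnd lines (stripB_pipe lines[start]) (start + 1) - start)) := by
  rw [stripB_go, dif_pos h]
  simp only [PySem.List.slice_natCast, PySem.List.slice_to_natCast]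

theorem AeqB (lines : List String) (start : Nat) (acc : List String) :
    stripA_go lines start acc = stripB_go lines start acc := by
  by_cases h : start < lines.length
  · have hge := stripB_runEnd_ge lines (stripB_pipe lines[start]) (start + 1)
    have hle : stripB_runEnd lines (stripB_pipe lines[start]) (start + 1) ≤ lines.length :=
      stripB_runEnd_le lines _ _ (by omega)
    rw [stripB_go_eq lines start acc h]
    rw [← AeqB lines (stripB_runEnd lines (stripB_pipe lines[start]) (start + 1)) _]
    by_cases hp : stripB_pipe lines[start] = true
    · rw [hp] at hge hle ⊢
      rw [if_pos rfl]
      exact A_pipe_run lines _ hle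
        (fun hlt => by simpa using stripB_runEnd_stop lines true (start + 1) hlt)
        start acc (by omega)
        (fun m h1 h2 hm => by
          rcases Nat.eq_or_lt_of_le h1 with rfl | hlt2
          · exact hp
          · exact stripB_runEnd_mem lines true (start + 1) m (by omega) h2 hm)
    · have hp' : stripB_pipe lines[start] = false := by simpa using hp
      rw [hp'] at hge hle ⊢
      rw [if_neg (by simp)]
      exact A_nonpipe_run lines _ hle start acc (by omega)
        (fun m h1 h2 hm => by
          rcases Nat.eq_or_lt_of_le h1 with rfl | hlt2
          · exact hp'
          · exact stripB_runEnd_mem lines false (start + 1) m (by omega) h2 hm)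
  · rw [stripA_go, stripB_go, dif_neg h, dif_neg h]
termination_by lines.length - start
decreasing_by omega

-- ===== VERDICT (by name: the statement is the Claim_ definition above) =====
theorem strip_markdown_tables_spec : Claim_equal_strip_markdown_tables := by
  intro text _
  unfold Spec_strip_markdown_tables strip_markdown_tables strip_markdown_tables_alt
  show PySem.Str.strip (PySem.Str.join "\n" (stripA_go (PySem.Str.splitlines text) 0 []))
      = PySem.Str.strip (PySem.Str.join "\n" (stripB_go (PySem.Str.splitlines text) 0 []))
  rw [AeqB]
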